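-- pv_equiv track=rewrite | github.com/srcsdk/linuxstore | dep_resolver.py | resolve_install_order
-- ===== SOURCE A (Python) =====
-- from collections import defaultdict
--
-- def topological_sort(graph):
--     """sort packages in dependency order."""
--     in_degree = defaultdict(int)
--     all_nodes = set(graph.keys())
--     for deps in graph.values():
--         all_nodes.update(deps)
--     for node in all_nodes:
--         in_degree[node] = 0
--     for node, deps in graph.items():
--         for dep in deps:
--             in_degree[node] += 0
--         for dep in deps:
--             pass
--     for node in all_nodes:
--         for parent, deps in graph.items():
--             if node in deps:
--                 in_degree[parent] += 1
--     queue = [n for n in all_nodes if in_degree[n] == 0]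
--     order = []
--     while queue:
--         queue.sort()
--         node = queue.pop(0)
--         order.append(node)
--         for parent in list(graph.keys()):
--             if node in graph.get(parent, set()):
--                 in_degree[parent] -= 1
--                 if in_degree[parent] == 0:
--                     queue.append(parent)
--     if len(order) != len(all_nodes):
--         return None
--     return order
--
-- def resolve_install_order(package, graph):
--     """determine install order for a package and its deps."""
--     to_install = set()
--
--     def collect(pkg):
--         if pkg in to_install:
--             return
--         to_install.add(pkg)
--         for dep in graph.get(pkg, []):
--             collect(dep)
--
--     collect(package)
--     sub_graph = {
--         k: v for k, v in graph.items() if k in to_install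
--     }
--     order = topological_sort(sub_graph)
--     return order
-- ===== SOURCE B (Python) =====
-- from bisect import insort
--
--
-- def _kahn_min(sub):
--     """Kahn's algorithm: reverse-adjacency index + sorted queue (smallest-first)."""
--     indeg = {}
--     rev = {}
--     nodes = set()
--     for k, deps in sub.items():
--         ds = set(deps)
--         nodes.add(k)
--         indeg[k] = len(ds)
--         for d in ds:
--             nodes.add(d)
--             rev.setdefault(d, []).append(k)
--     queue = sorted(n for n in nodes if indeg.get(n, 0) == 0)
--     order = []
--     while queue:
--         node = queue.pop(0)
--         order.append(node)
--         for parent in rev.get(node, []):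
--             indeg[parent] -= 1
--             if indeg[parent] == 0:
--                 insort(queue, parent)
--     if len(order) != len(nodes):
--         return None
--     return order
--
--
-- def resolve_install_order(package, graph):
--     """determine install order for a package and its deps."""
--     to_install = set()
--
--     def collect(pkg):
--         if pkg in to_install:
--             return
--         to_install.add(pkg)
--         for dep in graph.get(pkg, []):
--             collect(dep)
--
--     collect(package)
--     sub = {k: v for k, v in graph.items() if k in to_install}
--     return _kahn_min(sub)
-- ===== Notes on version B (the rewrite author's own statement) =====
-- stated objective: alternative
-- what changed: The per-node rescans of every adjacency list (for the in-degree table and again after each pop) are replaced by a single pass that builds the in-degree table plus a reverse-adjacency index, and the re-sort of the whole queue on every iteration is replaced by a sorted queue maintained with bisect.insort (Kahn's algorithm, smallest-first).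
import Mathlib
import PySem

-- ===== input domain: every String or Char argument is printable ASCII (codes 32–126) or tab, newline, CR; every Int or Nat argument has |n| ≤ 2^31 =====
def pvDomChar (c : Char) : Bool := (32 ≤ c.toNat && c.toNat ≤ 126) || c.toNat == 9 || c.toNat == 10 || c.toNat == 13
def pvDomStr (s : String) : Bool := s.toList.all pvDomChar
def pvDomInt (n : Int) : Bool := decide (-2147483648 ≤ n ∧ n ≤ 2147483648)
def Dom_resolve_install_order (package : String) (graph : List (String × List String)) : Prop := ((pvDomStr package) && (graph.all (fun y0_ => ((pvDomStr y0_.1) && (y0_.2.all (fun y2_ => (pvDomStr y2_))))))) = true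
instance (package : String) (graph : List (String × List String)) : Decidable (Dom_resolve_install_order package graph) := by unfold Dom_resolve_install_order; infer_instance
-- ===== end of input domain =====

-- B replaces the per-node adjacency-list rescans of A's topological sort by a one-pass
-- in-degree table + reverse-adjacency index and an insort-maintained sorted queue (alternative).

-- ===== PORT A =====
-- Helpers shared by BOTH ports: Source A and Source B contain the textually identical recursive `collect`
-- and the identical sub-graph comprehension, so their ports are shared definitions.
-- `pvCollect` / `pvCollectList` transliterate `collect` (recursion made total by a fuel argument:
-- each nesting level adds a new element to the set, so the depth never exceeds the number of
-- distinct addable nodes, which pvCollectFuel exceeds — the 0-fuel branch is unreachable).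
def pvCollectFuel (g : PySem.Dict String (List String)) : Nat :=
  g.size + g.values.flatten.length + 2

mutual
def pvCollect (g : PySem.Dict String (List String)) :
    Nat → String → PySem.Set String → PySem.Set String
  | 0, _, s => s
  | fuel+1, pkg, s =>
    if PySem.Set.contains s pkg then s
    else pvCollectList g fuel (g.getD pkg []) (PySem.Set.add s pkg)
def pvCollectList (g : PySem.Dict String (List String)) :
    Nat → List String → PySem.Set String → PySem.Set String
  | _, [], s => s
  | fuel, d :: ds, s => pvCollectList g fuel ds (pvCollect g fuel d s)
end

-- `sub = {k: v for k, v in graph.items() if k in to_install}` (identical in Source A and Source B)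
def pvSubGraph (g : PySem.Dict String (List String)) (ti : PySem.Set String) :
    PySem.Dict String (List String) :=
  g.items.foldl
    (fun d p => if PySem.Set.contains ti p.1 then d.insert p.1 p.2 else d)
    PySem.Dict.empty

-- fuel for the `while queue:` loops of both ports: strictly more than the possible number of
-- iterations (each node is enqueued at most once); the 0-fuel branch is never reached.
def pvLoopFuel (g : PySem.Dict String (List String)) : Nat :=
  2 * g.size + g.values.flatten.length + 2

-- A's inner scan: `for parent in list(graph.keys()): if node in graph.get(parent, set()): ...`
def pvScanA (g : PySem.Dict String (List String)) (node : String)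
    (st : PySem.Dict String Int × List String) : PySem.Dict String Int × List String :=
  g.items.foldl
    (fun st p =>
      if node ∈ p.2 then
        let v := st.1.getD p.1 0 - 1
        (st.1.insert p.1 v, if v == 0 then st.2 ++ [p.1] else st.2)
      else st)
    st

-- A's `while queue: queue.sort(); node = queue.pop(0); order.append(node); <scan>`
def pvTopoLoopA (g : PySem.Dict String (List String)) :
    Nat → PySem.Dict String Int → List String → List String → List String
  | 0, _, _, order => order
  | fuel+1, ind, queue, order =>
    if queue.isEmpty then order
    else
      let qs := PySem.List.sorted queue (fun x => x) false
      let node := qs.headD ""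
      let st := pvScanA g node (ind, qs.tail)
      pvTopoLoopA g fuel st.1 st.2 (order ++ [node])

-- Source A's `topological_sort` (iterations over the Python set `all_nodes` are ported in the Set's
-- first-insertion order; every use below is order-insensitive in the final result)
def pvTopoA (g : PySem.Dict String (List String)) : Option (List String) :=
  let allNodes :=
    g.items.foldl (fun s p => PySem.Set.update s p.2) (PySem.Set.ofList g.keys)
  let ind0 := allNodes.foldl (fun d n => d.insert n (0 : Int)) PySem.Dict.empty
  -- `for node, deps in graph.items(): for dep in deps: in_degree[node] += 0` (the second
  -- `for dep in deps: pass` loop has no effect and leaves no trace in the state)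
  let ind1 := g.items.foldl
    (fun d p => p.2.foldl (fun d' _ => d'.insert p.1 (d'.getD p.1 0 + 0)) d) ind0
  let ind2 := allNodes.foldl
    (fun d n => g.items.foldl
      (fun d' p => if n ∈ p.2 then d'.insert p.1 (d'.getD p.1 0 + 1) else d') d) ind1
  let queue := allNodes.filter (fun n => ind2.getD n 0 == 0)
  let order := pvTopoLoopA g (pvLoopFuel g) ind2 queue []
  if order.length != allNodes.length then none else some order

def resolve_install_order (package : String) (graph : List (String × List String)) :
    Option (List String) :=
  let g := PySem.Dict.ofList graph
  let toInstall := pvCollect g (pvCollectFuel g) package PySem.Set.empty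
  pvTopoA (pvSubGraph g toInstall)

-- ===== PORT B =====
-- `insort(queue, x)` from bisect: insertion into a sorted list
def pvInsort (x : String) (q : List String) : List String :=
  PySem.List.insertBy (fun a b => decide (a < b)) x q

-- Source B's single initialisation pass: indeg, rev (reverse adjacency) and nodes in one loop
-- (`for d in ds` iterates a Python set; ported in dedup order — every use is order-insensitive)
def pvInitB (g : PySem.Dict String (List String)) :
    PySem.Dict String Int × PySem.Dict String (List String) × PySem.Set String :=
  g.items.foldl
    (fun st p =>
      let ds := PySem.List.dedup p.2
      (st.1.insert p.1 (ds.length : Int),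
       ds.foldl (fun r d => r.modify d [] (· ++ [p.1])) st.2.1,
       ds.foldl (fun s d => PySem.Set.add s d) (PySem.Set.add st.2.2 p.1)))
    (PySem.Dict.empty, PySem.Dict.empty, PySem.Set.empty)

-- Source B's `while queue: node = queue.pop(0); order.append(node); for parent in rev.get(node, []): ...`
def pvTopoLoopB (rev : PySem.Dict String (List String)) :
    Nat → PySem.Dict String Int → List String → List String → List String
  | 0, _, _, order => order
  | fuel+1, ind, queue, order =>
    match queue with
    | [] => order
    | node :: rest =>
      let st := (rev.getD node []).foldl
        (fun (st : PySem.Dict String Int × List String) parent =>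
          let v := st.1.getD parent 0 - 1
          (st.1.insert parent v, if v == 0 then pvInsort parent st.2 else st.2))
        (ind, rest)
      pvTopoLoopB rev fuel st.1 st.2 (order ++ [node])

-- Source B's `_kahn_min`
def pvKahnB (sub : PySem.Dict String (List String)) : Option (List String) :=
  let init := pvInitB sub
  let queue := PySem.List.sorted
    (init.2.2.filter (fun n => init.1.getD n 0 == 0)) (fun x => x) false
  let order := pvTopoLoopB init.2.1 (pvLoopFuel sub) init.1 queue []
  if order.length != init.2.2.length then none else some order

def resolve_install_order_alt (package : String) (graph : List (String × List String)) :
    Option (List String) :=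
  let g := PySem.Dict.ofList graph
  let toInstall := pvCollect g (pvCollectFuel g) package PySem.Set.empty
  pvKahnB (pvSubGraph g toInstall)

-- ===== PRECONDITION & SPEC =====
def Spec_resolve_install_order (package : String) (graph : List (String × List String)) (out : Option (List String)) : Prop := out = resolve_install_order_alt package graph
instance (package : String) (graph : List (String × List String)) (out : Option (List String)) : Decidable (Spec_resolve_install_order package graph out) := by unfold Spec_resolve_install_order; infer_instance

-- ===== CLAIM (what is proved, stated in full; the proofs are below) =====
def Claim_equal_resolve_install_order : Prop := ∀ (package : String) (graph : List (String × List String)), Dom_resolve_install_order package graph → Spec_resolve_install_order package graph (resolve_install_order package graph)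



-- ===== LEMMAS AND PROOFS =====

-- abbreviations for the states the two ports build from the sub-graph
def pvAllA (g : PySem.Dict String (List String)) : PySem.Set String :=
  g.items.foldl (fun s p => PySem.Set.update s p.2) (PySem.Set.ofList g.keys)

def pvIndA (g : PySem.Dict String (List String)) : PySem.Dict String Int :=
  (pvAllA g).foldl
    (fun d n => g.items.foldl
      (fun d' p => if n ∈ p.2 then d'.insert p.1 (d'.getD p.1 0 + 1) else d') d)
    (g.items.foldl
      (fun d p => p.2.foldl (fun d' _ => d'.insert p.1 (d'.getD p.1 0 + 0)) d)
      ((pvAllA g).foldl (fun d n => d.insert n (0 : Int)) PySem.Dict.empty))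

def pvIndB (g : PySem.Dict String (List String)) : PySem.Dict String Int :=
  g.items.foldl
    (fun d p => d.insert p.1 ((PySem.List.dedup p.2).length : Int)) PySem.Dict.empty

def pvRevB (g : PySem.Dict String (List String)) : PySem.Dict String (List String) :=
  g.items.foldl
    (fun r p => (PySem.List.dedup p.2).foldl (fun r d => r.modify d [] (· ++ [p.1])) r)
    PySem.Dict.empty

def pvNodesB (g : PySem.Dict String (List String)) : PySem.Set String :=
  g.items.foldl
    (fun s p => (PySem.List.dedup p.2).foldl (fun s d => PySem.Set.add s d)
      (PySem.Set.add s p.1))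
    PySem.Set.empty

theorem pvTopoA_eq (g : PySem.Dict String (List String)) :
    pvTopoA g =
      (let queue := (pvAllA g).filter (fun n => (pvIndA g).getD n 0 == 0)
       let order := pvTopoLoopA g (pvLoopFuel g) (pvIndA g) queue []
       if order.length != (pvAllA g).length then none else some order) := rfl

theorem pvInitB_split (l : List (String × List String))
    (a : PySem.Dict String Int) (b : PySem.Dict String (List String))
    (c : PySem.Set String) :
    l.foldl
      (fun st p =>
        let ds := PySem.List.dedup p.2
        (st.1.insert p.1 (ds.length : Int),
         ds.foldl (fun r d => r.modify d [] (· ++ [p.1])) st.2.1,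
         ds.foldl (fun s d => PySem.Set.add s d) (PySem.Set.add st.2.2 p.1)))
      (a, b, c)
    = (l.foldl (fun d p => d.insert p.1 ((PySem.List.dedup p.2).length : Int)) a,
       l.foldl (fun r p => (PySem.List.dedup p.2).foldl
         (fun r d => r.modify d [] (· ++ [p.1])) r) b,
       l.foldl (fun s p => (PySem.List.dedup p.2).foldl (fun s d => PySem.Set.add s d)
         (PySem.Set.add s p.1)) c) := by
  induction l generalizing a b c with
  | nil => rfl
  | cons p t ih => simpa using ih _ _ _

theorem pvInitB_eq (g : PySem.Dict String (List String)) :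
    pvInitB g = (pvIndB g, pvRevB g, pvNodesB g) := pvInitB_split _ _ _ _

theorem pvKahnB_eq (g : PySem.Dict String (List String)) :
    pvKahnB g =
      (let queue := PySem.List.sorted
         ((pvNodesB g).filter (fun n => (pvIndB g).getD n 0 == 0)) (fun x => x) false
       let order := pvTopoLoopB (pvRevB g) (pvLoopFuel g) (pvIndB g) queue []
       if order.length != (pvNodesB g).length then none else some order) := by
  unfold pvKahnB
  rw [pvInitB_eq]

-- membership / nodup of the two all-node sets
theorem mem_foldl_update (l : List (String × List String)) (s : PySem.Set String)
    (y : String) :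
    (y ∈ l.foldl (fun s p => PySem.Set.update s p.2) s) ↔
      y ∈ s ∨ ∃ p ∈ l, y ∈ p.2 := by
  induction l generalizing s with
  | nil => simp
  | cons p t ih => simp [ih, PySem.Set.mem_update]; tauto

theorem nodup_foldl_update (l : List (String × List String)) (s : PySem.Set String)
    (h : s.Nodup) : (l.foldl (fun s p => PySem.Set.update s p.2) s).Nodup := by
  induction l generalizing s with
  | nil => exact h
  | cons p t ih => exact ih _ (PySem.Set.nodup_update _ _ h)

theorem mem_pvAllA (g : PySem.Dict String (List String)) (y : String) :
    y ∈ pvAllA g ↔ y ∈ g.keys ∨ ∃ p ∈ g.items, y ∈ p.2 := by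
  unfold pvAllA
  rw [mem_foldl_update]
  simp [PySem.Set.mem_ofList]

theorem nodup_pvAllA (g : PySem.Dict String (List String)) : (pvAllA g).Nodup :=
  nodup_foldl_update _ _ (PySem.Set.nodup_ofList _)

theorem mem_foldl_nodes (l : List (String × List String)) (s : PySem.Set String)
    (y : String) :
    (y ∈ l.foldl (fun s p => (PySem.List.dedup p.2).foldl
        (fun s d => PySem.Set.add s d) (PySem.Set.add s p.1)) s) ↔
      y ∈ s ∨ ∃ p ∈ l, y = p.1 ∨ y ∈ p.2 := by
  induction l generalizing s with
  | nil => simp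
  | cons p t ih =>
    rw [List.foldl_cons, ih]
    have hin : ∀ s' : PySem.Set String,
        (y ∈ (PySem.List.dedup p.2).foldl (fun s d => PySem.Set.add s d) s') ↔
          y ∈ s' ∨ y ∈ p.2 := by
      intro s'
      have h2 := PySem.Set.mem_foldl_add (l := PySem.List.dedup p.2)
        (f := fun d => d) (s := s') (y := y)
      simp only [h2]
      simp
    rw [hin]
    simp only [PySem.Set.mem_add, List.mem_cons]
    constructor
    · rintro (((h | h) | h) | ⟨q, hq, h⟩)
      · exact Or.inl h
      · exact Or.inr ⟨p, Or.inl rfl, Or.inl h⟩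
      · exact Or.inr ⟨p, Or.inl rfl, Or.inr h⟩
      · exact Or.inr ⟨q, Or.inr hq, h⟩
    · rintro (h | ⟨q, rfl | hq, h⟩)
      · exact Or.inl (Or.inl (Or.inl h))
      · rcases h with h | h
        · exact Or.inl (Or.inl (Or.inr h))
        · exact Or.inl (Or.inr h)
      · exact Or.inr ⟨q, hq, h⟩

theorem nodup_foldl_nodes (l : List (String × List String)) (s : PySem.Set String)
    (h : s.Nodup) :
    (l.foldl (fun s p => (PySem.List.dedup p.2).foldl
        (fun s d => PySem.Set.add s d) (PySem.Set.add s p.1)) s).Nodup := by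
  induction l generalizing s with
  | nil => exact h
  | cons p t ih =>
    apply ih
    have hstep : ∀ (ds : List String) (s' : PySem.Set String), s'.Nodup →
        (ds.foldl (fun s d => PySem.Set.add s d) s').Nodup := by
      intro ds
      induction ds with
      | nil => intro s' h'; exact h'
      | cons d t ih' => intro s' h'; exact ih' _ (PySem.Set.nodup_add _ _ h')
    exact hstep _ _ (PySem.Set.nodup_add _ _ h)

theorem mem_pvNodesB (g : PySem.Dict String (List String)) (y : String) :
    y ∈ pvNodesB g ↔ ∃ p ∈ g.items, y = p.1 ∨ y ∈ p.2 := by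
  unfold pvNodesB
  rw [mem_foldl_nodes]
  simp

theorem nodup_pvNodesB (g : PySem.Dict String (List String)) : (pvNodesB g).Nodup :=
  nodup_foldl_nodes _ _ (by simp [PySem.Set.empty])

theorem allA_perm_nodesB (g : PySem.Dict String (List String)) :
    (pvAllA g).Perm (pvNodesB g) := by
  rw [List.perm_ext_iff_of_nodup (nodup_pvAllA g) (nodup_pvNodesB g)]
  intro a
  rw [mem_pvAllA, mem_pvNodesB]
  simp only [PySem.Dict.keys]
  constructor
  · rintro (h | ⟨p, hp, hm⟩)
    · simp only [List.mem_map] at h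
      obtain ⟨p, hp, rfl⟩ := h
      exact ⟨p, hp, Or.inl rfl⟩
    · exact ⟨p, hp, Or.inr hm⟩
  · rintro ⟨p, hp, rfl | hm⟩
    · exact Or.inl (List.mem_map.mpr ⟨p, hp, rfl⟩)
    · exact Or.inr ⟨p, hp, hm⟩

-- in-degree tables: pointwise characterisations
theorem getD_foldl_insert_not_mem (l : List (String × List String)) (x : String)
    (h : x ∉ l.map Prod.fst) (d : PySem.Dict String Int) (f : List String → Int) :
    (l.foldl (fun d p => d.insert p.1 (f p.2)) d).getD x 0 = d.getD x 0 := by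
  induction l generalizing d with
  | nil => rfl
  | cons p t ih =>
    simp only [List.map_cons, List.mem_cons, not_or] at h
    rw [List.foldl_cons, ih h.2, PySem.Dict.getD_insert]
    simp [h.1]

theorem getD_foldl_insert_mem (l : List (String × List String))
    (hl : (l.map Prod.fst).Nodup) (d : PySem.Dict String Int)
    (f : List String → Int) (x : String) (ds : List String) (h : (x, ds) ∈ l) :
    (l.foldl (fun d p => d.insert p.1 (f p.2)) d).getD x 0 = f ds := by
  induction l generalizing d with
  | nil => simp at h
  | cons p t ih =>
    simp only [List.map_cons, List.nodup_cons] at hl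
    rw [List.foldl_cons]
    rcases List.mem_cons.mp h with h1 | h1
    · have hx : p.1 = x := by rw [← h1]
      have hnotin : x ∉ t.map Prod.fst := hx ▸ hl.1
      rw [getD_foldl_insert_not_mem t x hnotin, PySem.Dict.getD_insert]
      simp [← h1]
    · exact ih hl.2 _ h1

theorem getD_pvIndB_mem (g : PySem.Dict String (List String)) (hnd : g.keys.Nodup)
    (x : String) (ds : List String) (h : (x, ds) ∈ g.items) :
    (pvIndB g).getD x 0 = ((PySem.List.dedup ds).length : Int) :=
  getD_foldl_insert_mem g.items (by simpa [PySem.Dict.keys] using hnd) _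
    (fun v => ((PySem.List.dedup v).length : Int)) x ds h

theorem getD_pvIndB_not_mem (g : PySem.Dict String (List String)) (x : String)
    (h : ∀ p ∈ g.items, p.1 ≠ x) : (pvIndB g).getD x 0 = 0 := by
  refine (getD_foldl_insert_not_mem g.items x ?_ PySem.Dict.empty
    (fun v => ((PySem.List.dedup v).length : Int))).trans ?_
  · simp only [List.mem_map]
    rintro ⟨p, hp, rfl⟩
    exact h p hp rfl
  · simp [PySem.Dict.getD_empty]

theorem getD_zero_foldl_insert_zero (l : List String) (d : PySem.Dict String Int)
    (h : ∀ x, d.getD x 0 = 0) (x : String) :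
    (l.foldl (fun d n => d.insert n (0 : Int)) d).getD x 0 = 0 := by
  induction l generalizing d with
  | nil => exact h x
  | cons n t ih =>
    apply ih
    intro y
    rw [PySem.Dict.getD_insert]
    split <;> simp [h]

theorem getD_zero_inner_noop (m : List String) (k : String)
    (d : PySem.Dict String Int) (h : ∀ x, d.getD x 0 = 0) (x : String) :
    (m.foldl (fun d' _ => d'.insert k (d'.getD k 0 + 0)) d).getD x 0 = 0 := by
  induction m generalizing d with
  | nil => exact h x
  | cons a t ih =>
    apply ih
    intro y
    rw [PySem.Dict.getD_insert]
    split <;> simp [h]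

theorem getD_zero_ind1 (l : List (String × List String)) (d : PySem.Dict String Int)
    (h : ∀ x, d.getD x 0 = 0) (x : String) :
    (l.foldl (fun acc p => p.2.foldl
        (fun acc' _ => acc'.insert p.1 (acc'.getD p.1 0 + 0)) acc) d).getD x 0 = 0 := by
  induction l generalizing d with
  | nil => exact h x
  | cons p t ih =>
    rw [List.foldl_cons]
    exact ih _ (getD_zero_inner_noop p.2 p.1 d h)

theorem getD_scanCount (n : String) (l : List (String × List String))
    (hl : (l.map Prod.fst).Nodup) (d : PySem.Dict String Int) (x : String) :
    (l.foldl (fun d' p => if n ∈ p.2 then d'.insert p.1 (d'.getD p.1 0 + 1) else d') d).getD x 0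
      = d.getD x 0 + (if ∃ p ∈ l, p.1 = x ∧ n ∈ p.2 then 1 else 0) := by
  induction l generalizing d with
  | nil => simp
  | cons p t ih =>
    simp only [List.map_cons, List.nodup_cons] at hl
    rw [List.foldl_cons]
    by_cases hn : n ∈ p.2
    · simp only [hn, if_true]
      rw [ih hl.2]
      by_cases hx : p.1 = x
      · subst hx
        rw [PySem.Dict.getD_insert]
        have ht : ¬ ∃ q ∈ t, q.1 = p.1 ∧ n ∈ q.2 := by
          rintro ⟨q, hq, hq1, -⟩
          exact hl.1 (hq1 ▸ List.mem_map.mpr ⟨q, hq, rfl⟩)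
        simp [ht, hn]
      · rw [PySem.Dict.getD_insert]
        have hiff : (∃ q ∈ p :: t, q.1 = x ∧ n ∈ q.2) ↔ ∃ q ∈ t, q.1 = x ∧ n ∈ q.2 := by
          simp only [List.mem_cons]
          constructor
          · rintro ⟨q, rfl | hq, hq1, hq2⟩
            · exact absurd hq1 hx
            · exact ⟨q, hq, hq1, hq2⟩
          · rintro ⟨q, hq, hq1, hq2⟩
            exact ⟨q, Or.inr hq, hq1, hq2⟩
        simp only [hiff]
        simp [Ne.symm hx]
    · simp only [hn, if_false]
      rw [ih hl.2]
      have hiff : (∃ q ∈ p :: t, q.1 = x ∧ n ∈ q.2) ↔ ∃ q ∈ t, q.1 = x ∧ n ∈ q.2 := by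
        simp only [List.mem_cons]
        constructor
        · rintro ⟨q, rfl | hq, hq1, hq2⟩
          · exact absurd hq2 hn
          · exact ⟨q, hq, hq1, hq2⟩
        · rintro ⟨q, hq, hq1, hq2⟩
          exact ⟨q, Or.inr hq, hq1, hq2⟩
      simp only [hiff]

theorem getD_outer_count (l : List (String × List String))
    (hl : (l.map Prod.fst).Nodup) (ns : List String) (d : PySem.Dict String Int)
    (x : String) :
    ((ns.foldl (fun d n => l.foldl
        (fun d' p => if n ∈ p.2 then d'.insert p.1 (d'.getD p.1 0 + 1) else d') d) d)).getD x 0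
      = d.getD x 0 + (ns.countP (fun nn => decide (∃ p ∈ l, p.1 = x ∧ nn ∈ p.2)) : Int) := by
  induction ns generalizing d with
  | nil => simp
  | cons n t ih =>
    rw [List.foldl_cons, ih, getD_scanCount n l hl d x, List.countP_cons]
    by_cases h : ∃ p ∈ l, p.1 = x ∧ n ∈ p.2
    · simp [h]
      ring
    · simp [h]

theorem getD_pvIndA (g : PySem.Dict String (List String)) (hnd : g.keys.Nodup)
    (x : String) :
    (pvIndA g).getD x 0 =
      ((pvAllA g).countP (fun nn => decide (∃ p ∈ g.items, p.1 = x ∧ nn ∈ p.2)) : Int) := by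
  unfold pvIndA
  have hl : (g.items.map Prod.fst).Nodup := by simpa [PySem.Dict.keys] using hnd
  rw [getD_outer_count g.items hl (pvAllA g) _ x, getD_zero_ind1 _ _
    (getD_zero_foldl_insert_zero _ _ (fun y => by simp [PySem.Dict.getD_empty]))]
  simp

theorem ind_pointwise (g : PySem.Dict String (List String)) (hnd : g.keys.Nodup)
    (x : String) : (pvIndA g).getD x 0 = (pvIndB g).getD x 0 := by
  have hl : (g.items.map Prod.fst).Nodup := by simpa [PySem.Dict.keys] using hnd
  rw [getD_pvIndA g hnd x]
  by_cases hx : ∃ p ∈ g.items, p.1 = x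
  · obtain ⟨p, hp, hpx⟩ := hx
    have hmem : (x, p.2) ∈ g.items := by
      have : p = (x, p.2) := by rw [← hpx]
      rw [← this]; exact hp
    rw [getD_pvIndB_mem g hnd x p.2 hmem]
    have hpred : ∀ nn, (decide (∃ q ∈ g.items, q.1 = x ∧ nn ∈ q.2))
        = (decide (nn ∈ p.2)) := by
      intro nn
      by_cases hm : nn ∈ p.2
      · simp only [hm, decide_true, decide_eq_true_eq]
        exact ⟨p, hp, hpx, hm⟩
      · simp only [hm, decide_false, decide_eq_false_iff_not]
        rintro ⟨q, hq, hq1, hq2⟩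
        have : q = p := List.inj_on_of_nodup_map hl hq hp (by rw [hq1, hpx])
        exact hm (this ▸ hq2)
    rw [List.countP_congr (fun nn _ => by rw [hpred nn]), List.countP_eq_length_filter]
    have hperm : ((pvAllA g).filter (fun nn => decide (nn ∈ p.2))).Perm
        (PySem.List.dedup p.2) := by
      rw [List.perm_ext_iff_of_nodup ((nodup_pvAllA g).filter _)
        (PySem.List.nodup_dedup _)]
      intro a
      rw [List.mem_filter, PySem.List.mem_dedup, mem_pvAllA]
      constructor
      · rintro ⟨-, h2⟩; exact of_decide_eq_true h2
      · intro h2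
        exact ⟨Or.inr ⟨p, hp, h2⟩, decide_eq_true h2⟩
    rw [hperm.length_eq]
  · push Not at hx
    rw [getD_pvIndB_not_mem g x (fun p hp => hx p hp)]
    have : (pvAllA g).countP (fun nn => decide (∃ p ∈ g.items, p.1 = x ∧ nn ∈ p.2)) = 0 := by
      rw [List.countP_eq_zero]
      intro a _
      simp only [decide_eq_true_eq]
      rintro ⟨p, hp, hp1, -⟩
      exact hx p hp hp1
    simp [this]

-- reverse adjacency characterisation
theorem getD_revB_aux (n : String) (l : List (String × List String))
    (r : PySem.Dict String (List String)) :
    (l.foldl (fun r p => (PySem.List.dedup p.2).foldl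
        (fun r d => r.modify d [] (· ++ [p.1])) r) r).getD n []
      = r.getD n [] ++ (l.filter (fun p => decide (n ∈ p.2))).map Prod.fst := by
  induction l generalizing r with
  | nil => simp
  | cons p t ih =>
    rw [List.foldl_cons, ih]
    have hstep : ((PySem.List.dedup p.2).foldl
        (fun r d => r.modify d [] (· ++ [p.1])) r).getD n []
        = r.getD n [] ++ (if n ∈ p.2 then [p.1] else []) := by
      have hmap : (PySem.List.dedup p.2).foldl
          (fun r d => r.modify d [] (· ++ [p.1])) r
          = ((PySem.List.dedup p.2).map (fun d => (d, p.1))).foldl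
            (fun r q => r.modify q.1 [] (· ++ [q.2])) r := by
        rw [List.foldl_map]
      rw [hmap, PySem.Dict.getD_foldl_modify_append]
      congr 1
      rw [List.filter_map]
      have : (PySem.List.dedup p.2).filter
          ((fun q : String × String => q.1 == n) ∘ (fun d => (d, p.1)))
          = (PySem.List.dedup p.2).filter (fun d => d == n) := rfl
      rw [this, List.filter_beq]
      by_cases hm : n ∈ p.2
      · rw [List.count_eq_one_of_mem (PySem.List.nodup_dedup _)
          ((PySem.List.mem_dedup _ _).mpr hm)]
        simp [hm]
      · rw [List.count_eq_zero.mpr (fun hc => hm ((PySem.List.mem_dedup _ _).mp hc))]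
        simp [hm]
    rw [hstep]
    by_cases hm : n ∈ p.2 <;> simp [hm]

theorem getD_pvRevB (g : PySem.Dict String (List String)) (n : String) :
    (pvRevB g).getD n [] = (g.items.filter (fun p => decide (n ∈ p.2))).map Prod.fst := by
  unfold pvRevB
  rw [getD_revB_aux]
  simp [PySem.Dict.getD_empty]

-- the sorted-queue step
theorem insort_sorted (x : String) (l : List String) :
    pvInsort x (PySem.List.sorted l (fun y => y) false) =
      PySem.List.sorted (l ++ [x]) (fun y => y) false := by
  rw [PySem.List.sorted_eq_foldl_insertBy, PySem.List.sorted_eq_foldl_insertBy,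
    List.foldl_append]
  rfl

-- per-iteration scan bisimulation
theorem scan_eq (lf : List (String × List String)) :
    ∀ (indA indB : PySem.Dict String Int) (qA qB : List String),
    (∀ x, indA.getD x 0 = indB.getD x 0) →
    qB = PySem.List.sorted qA (fun y => y) false →
    (∀ x,
      (lf.foldl (fun st p =>
          let v := st.1.getD p.1 0 - 1
          (st.1.insert p.1 v, if v == 0 then st.2 ++ [p.1] else st.2)) (indA, qA)).1.getD x 0
        = ((lf.map Prod.fst).foldl (fun st parent =>
            let v := st.1.getD parent 0 - 1
            (st.1.insert parent v, if v == 0 then pvInsort parent st.2 else st.2))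
            (indB, qB)).1.getD x 0) ∧
    ((lf.map Prod.fst).foldl (fun st parent =>
        let v := st.1.getD parent 0 - 1
        (st.1.insert parent v, if v == 0 then pvInsort parent st.2 else st.2))
        (indB, qB)).2
      = PySem.List.sorted
          (lf.foldl (fun st p =>
            let v := st.1.getD p.1 0 - 1
            (st.1.insert p.1 v, if v == 0 then st.2 ++ [p.1] else st.2)) (indA, qA)).2
          (fun y => y) false := by
  induction lf with
  | nil =>
    intro indA indB qA qB hpt hq
    exact ⟨hpt, hq⟩
  | cons p t ih =>
    intro indA indB qA qB hpt hq
    simp only [List.map_cons, List.foldl_cons]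
    have hv : indB.getD p.1 0 - 1 = indA.getD p.1 0 - 1 := by rw [hpt p.1]
    rw [hv]
    apply ih
    · intro x
      rw [PySem.Dict.getD_insert, PySem.Dict.getD_insert]
      split
      · rfl
      · exact hpt x
    · by_cases h0 : (indA.getD p.1 0 - 1) == 0
      · simp only [h0, if_true]
        rw [hq, insort_sorted]
      · simp only [h0]
        exact hq

-- the main loop bisimulation
theorem loop_eq (g : PySem.Dict String (List String))
    (rev : PySem.Dict String (List String))
    (hrev : ∀ n, rev.getD n [] = (g.items.filter (fun p => decide (n ∈ p.2))).map Prod.fst) :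
    ∀ (fuel : Nat) (indA indB : PySem.Dict String Int) (qA qB order : List String),
    (∀ x, indA.getD x 0 = indB.getD x 0) →
    qB = PySem.List.sorted qA (fun y => y) false →
    pvTopoLoopA g fuel indA qA order = pvTopoLoopB rev fuel indB qB order := by
  intro fuel
  induction fuel with
  | zero => intro indA indB qA qB order _ _; rfl
  | succ f ih =>
    intro indA indB qA qB order hpt hq
    by_cases hA : qA = []
    · subst hA
      have : qB = [] := by
        rw [hq]
        exact (PySem.List.sorted_eq_nil_iff _ _ _).mpr rfl
      subst this
      rfl
    · have hqs : PySem.List.sorted qA (fun y => y) false ≠ [] := by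
        rw [Ne, PySem.List.sorted_eq_nil_iff]
        exact hA
      obtain ⟨node, rest, hns⟩ := List.exists_cons_of_ne_nil hqs
      have hrest : rest = PySem.List.sorted rest (fun y => y) false := by
        have hp := PySem.List.sorted_pairwise qA (fun y => y)
        rw [hns] at hp
        exact (PySem.List.sorted_eq_self_of_pairwise _ _
          (List.pairwise_cons.mp hp).2).symm
      have hscan := scan_eq (g.items.filter (fun p => decide (node ∈ p.2)))
        indA indB rest rest hpt hrest
      have hAstep : pvTopoLoopA g (f + 1) indA qA order
          = pvTopoLoopA g f
            ((g.items.filter (fun p => decide (node ∈ p.2))).foldl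
              (fun st p =>
                let v := st.1.getD p.1 0 - 1
                (st.1.insert p.1 v, if v == 0 then st.2 ++ [p.1] else st.2))
              (indA, rest)).1
            ((g.items.filter (fun p => decide (node ∈ p.2))).foldl
              (fun st p =>
                let v := st.1.getD p.1 0 - 1
                (st.1.insert p.1 v, if v == 0 then st.2 ++ [p.1] else st.2))
              (indA, rest)).2
            (order ++ [node]) := by
        rw [pvTopoLoopA]
        have hemp : qA.isEmpty = false := by simpa [List.isEmpty_iff] using hA
        rw [hemp]
        simp only [Bool.false_eq_true, if_false, pvScanA, hns,
          List.headD_cons, List.tail_cons]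
        rw [PySem.List.foldl_ite_eq_foldl_filter
          (p := fun p : String × List String => node ∈ p.2)
          (f := fun (st : PySem.Dict String Int × List String)
              (p : String × List String) =>
            (st.1.insert p.1 (st.1.getD p.1 0 - 1),
             if (st.1.getD p.1 0 - 1) == 0 then st.2 ++ [p.1] else st.2))]
      have hBstep : pvTopoLoopB rev (f + 1) indB qB order
          = pvTopoLoopB rev f
            (((g.items.filter (fun p => decide (node ∈ p.2))).map Prod.fst).foldl
              (fun st parent =>
                let v := st.1.getD parent 0 - 1
                (st.1.insert parent v, if v == 0 then pvInsort parent st.2 else st.2))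
              (indB, rest)).1
            (((g.items.filter (fun p => decide (node ∈ p.2))).map Prod.fst).foldl
              (fun st parent =>
                let v := st.1.getD parent 0 - 1
                (st.1.insert parent v, if v == 0 then pvInsort parent st.2 else st.2))
              (indB, rest)).2
            (order ++ [node]) := by
        rw [hq, hns, pvTopoLoopB, hrev node]
      rw [hAstep, hBstep]
      exact ih _ _ _ _ _ hscan.1 hscan.2

theorem main_topo (g : PySem.Dict String (List String)) (hnd : g.keys.Nodup) :
    pvTopoA g = pvKahnB g := by
  rw [pvTopoA_eq, pvKahnB_eq]
  have hq : PySem.List.sorted ((pvNodesB g).filter (fun n => (pvIndB g).getD n 0 == 0))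
      (fun x => x) false
      = PySem.List.sorted ((pvAllA g).filter (fun n => (pvIndA g).getD n 0 == 0))
      (fun x => x) false := by
    apply PySem.List.sorted_eq_sorted_of_perm _ _ _ (fun a b h => h)
    have h1 : (pvNodesB g).filter (fun n => (pvIndB g).getD n 0 == 0)
        = (pvNodesB g).filter (fun n => (pvIndA g).getD n 0 == 0) := by
      apply List.filter_congr
      intro n _
      rw [ind_pointwise g hnd n]
    rw [h1]
    exact ((allA_perm_nodesB g).filter _).symm
  have horder :
      pvTopoLoopA g (pvLoopFuel g) (pvIndA g)
        ((pvAllA g).filter (fun n => (pvIndA g).getD n 0 == 0)) []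
      = pvTopoLoopB (pvRevB g) (pvLoopFuel g) (pvIndB g)
        (PySem.List.sorted ((pvNodesB g).filter (fun n => (pvIndB g).getD n 0 == 0))
          (fun x => x) false) [] := by
    rw [hq]
    exact loop_eq g (pvRevB g) (getD_pvRevB g) _ _ _ _ _ _
      (ind_pointwise g hnd) rfl
  simp only [← horder, (allA_perm_nodesB g).length_eq]

theorem sub_nodup (g : PySem.Dict String (List String)) (ti : PySem.Set String) :
    (pvSubGraph g ti).keys.Nodup := by
  unfold pvSubGraph
  rw [PySem.List.foldl_ite_eq_foldl_filter
    (p := fun p : String × List String => PySem.Set.contains ti p.1 = true)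
    (f := fun (d : PySem.Dict String (List String)) (p : String × List String) =>
      d.insert p.1 p.2)]
  exact PySem.Dict.nodup_keys_foldl_insert_key _ Prod.fst (fun _ p => p.2) _
    (by simp [PySem.Dict.keys_empty])

-- ===== VERDICT (by name: the statement is the Claim_ definition above) =====
theorem resolve_install_order_spec : Claim_equal_resolve_install_order := by
  intro package graph _
  unfold Spec_resolve_install_order resolve_install_order resolve_install_order_alt
  exact main_topo _ (sub_nodup _ _)
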